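-- pv_equiv track=rewrite | github.com/vrboxing/spacman | spacman.py | get_pkglist_recursive_needs
-- ===== SOURCE A (Python) =====
-- def get_pkglist_recursive_needs(system_pkg_info, pkglist):
--     result = set()
--     query_invalid_result = list()
--
--     def add_pkg_recursive_needs(pkglist_):
--         for pkg in pkglist_:
--             if not pkg in result:
--                 if pkg in system_pkg_info:
--                     result.add(pkg)
--                     add_pkg_recursive_needs(system_pkg_info[pkg][2])
--                 else:
--                     query_invalid_result.append(pkg)
--
--     add_pkg_recursive_needs(pkglist)
--     return (result, query_invalid_result)
-- ===== SOURCE B (Python) =====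
-- def get_pkglist_recursive_needs(system_pkg_info, pkglist):
--     # Iterative traversal with an explicit stack of frame iterators (one per
--     # dependency list being walked) instead of A's recursive closure.
--     result = set()
--     query_invalid_result = []
--     frames = [iter(pkglist)]
--     while frames:
--         pkg = next(frames[-1], None)
--         if pkg is None:
--             frames.pop()
--         elif pkg in result:
--             continue
--         elif pkg in system_pkg_info:
--             result.add(pkg)
--             frames.append(iter(system_pkg_info[pkg][2]))
--         else:
--             query_invalid_result.append(pkg)
--     return (result, query_invalid_result)
-- ===== Notes on version B (the rewrite author's own statement) =====
-- stated objective: alternative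
-- what changed: Replaces the recursive closure mutating enclosing state with an iterative loop over an explicit stack of per-dependency-list frame iterators and separate accumulators, preserving preorder and duplicate behaviour.
-- outside the precondition, e.g. on get_pkglist_recursive_needs({'a': [['x']], 'b': [[], [], ['a']]}, ['y']): A returns (set(), ['y']), B returns (set(), ['y'])
import Mathlib
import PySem

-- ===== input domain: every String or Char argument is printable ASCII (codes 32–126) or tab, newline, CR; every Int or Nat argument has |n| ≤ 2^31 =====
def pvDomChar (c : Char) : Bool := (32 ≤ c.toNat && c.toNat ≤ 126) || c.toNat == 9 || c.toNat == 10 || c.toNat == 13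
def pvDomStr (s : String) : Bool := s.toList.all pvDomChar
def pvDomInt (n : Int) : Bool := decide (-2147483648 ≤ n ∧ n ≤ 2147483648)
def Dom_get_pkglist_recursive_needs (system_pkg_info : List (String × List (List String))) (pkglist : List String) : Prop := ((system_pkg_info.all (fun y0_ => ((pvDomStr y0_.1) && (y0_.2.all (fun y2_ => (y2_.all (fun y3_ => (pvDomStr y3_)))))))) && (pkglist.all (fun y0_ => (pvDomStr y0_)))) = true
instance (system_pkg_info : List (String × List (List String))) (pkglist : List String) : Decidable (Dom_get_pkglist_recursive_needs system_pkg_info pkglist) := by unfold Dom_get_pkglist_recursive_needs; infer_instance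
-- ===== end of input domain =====

-- B replaces A's recursive closure by an iterative loop over a stack of frame iterators (same values, same order).

-- termination measure shared by both ports: number of distinct table keys not yet in `result`
def pvUnvisited (info : List (String × List (List String))) (r : List String) : Nat :=
  ((info.map Prod.fst).dedup).countP (fun k => decide (k ∉ r))

-- strict countP comparison (cited by the termination proofs)
theorem pv_countP_lt {α : Type} {l : List α} {p q : α → Bool}
    (h : ∀ x ∈ l, p x = true → q x = true) {a : α} (ha : a ∈ l)
    (hp : p a = false) (hq : q a = true) : l.countP p < l.countP q := by
  induction l with
  | nil => cases ha
  | cons x l ih =>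
    rcases List.mem_cons.mp ha with rfl | ha'
    · have hle : l.countP p ≤ l.countP q :=
        List.countP_mono_left (fun x hx => h x (List.mem_cons_of_mem _ hx))
      simp [hp, hq]; omega
    · have hlt := ih (fun x hx => h x (List.mem_cons_of_mem _ hx)) ha'
      by_cases hx : p x = true
      · have := h x (List.mem_cons_self) hx
        simp [hx, this]; omega
      · simp only [List.countP_cons]
        rcases Bool.eq_false_or_eq_true (q x) with hq' | hq' <;> simp [hx, hq'] <;> omega

-- the measure drops strictly whenever a fresh table key is added to the result (cited by the termination proofs)
theorem pvUnvisited_lt {info : List (String × List (List String))} {r r' : List String} {p : String}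
    (hsub : ∀ x ∈ r, x ∈ r') (hpmem : p ∈ r') (hk : p ∈ info.map Prod.fst) (hp : p ∉ r) :
    pvUnvisited info r' < pvUnvisited info r := by
  unfold pvUnvisited
  exact pv_countP_lt
    (fun x _ hx => by
      simp only [decide_eq_true_iff] at hx ⊢
      exact fun hmem => hx (hsub x hmem))
    (List.mem_dedup.mpr hk)
    (by simp [hpmem]) (by simp [hp])

-- get? = some means the key occurs in the table (cited by the termination proofs)
theorem pv_key_mem {info : List (String × List (List String))} {p : String} {v : List (List String)}
    (h : (PySem.Dict.mk info).get? p = some v) : p ∈ info.map Prod.fst := by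
  by_contra hnot
  have : (PySem.Dict.mk info).get? p = none :=
    (PySem.Dict.get?_eq_none_iff_not_mem_keys _ _).mpr (by simpa using hnot)
  simp [this] at h

-- ===== PORT A =====
-- A's nested `add_pkg_recursive_needs` mutating the closure variables (result, query_invalid_result),
-- as state-passing recursion; the subtype carries the invariant `result only grows`, needed for termination.
-- `system_pkg_info[pkg][2]` is PySem.List.pyGet? v 2; its none case (IndexError in Python) is excluded by Pre_.
def pvGoA (info : List (String × List (List String)))
    (st : PySem.Set String × List String) (l : List String) :
    {out : PySem.Set String × List String // ∀ x ∈ st.1, x ∈ out.1} :=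
  match l with
  | [] => ⟨st, fun _ h => h⟩
  | p :: rest =>
    if hmem : PySem.Set.contains st.1 p = true then
      let r := pvGoA info st rest
      ⟨r.1, r.2⟩
    else
      match hlk : (PySem.Dict.mk info).get? p with
      | some v =>
        let r1 := pvGoA info (PySem.Set.add st.1 p, st.2) ((PySem.List.pyGet? v 2).getD [])
        let r2 := pvGoA info r1.1 rest
        ⟨r2.1, fun x hx => r2.2 x (r1.2 x (by simp [PySem.Set.mem_add]; exact Or.inl hx))⟩
      | none =>
        let r := pvGoA info (st.1, st.2 ++ [p]) rest
        ⟨r.1, r.2⟩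
termination_by (pvUnvisited info st.1, l.length)
decreasing_by
  · exact Prod.Lex.right _ (Nat.lt_succ_self _)
  · apply Prod.Lex.left
    have hp : p ∉ st.1 := fun h => hmem ((PySem.Set.contains_iff _ _).mpr h)
    exact pvUnvisited_lt (fun x hx => by simp [PySem.Set.mem_add]; exact Or.inl hx)
      (by simp [PySem.Set.mem_add]) (pv_key_mem hlk) hp
  · apply Prod.Lex.left
    have hp : p ∉ st.1 := fun h => hmem ((PySem.Set.contains_iff _ _).mpr h)
    exact pvUnvisited_lt
      (fun x hx => r1.2 x (by simp [PySem.Set.mem_add]; exact Or.inl hx))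
      (r1.2 p (by simp [PySem.Set.mem_add])) (pv_key_mem hlk) hp
  · exact Prod.Lex.right _ (Nat.lt_succ_self _)

def get_pkglist_recursive_needs (system_pkg_info : List (String × List (List String))) (pkglist : List String) : List String × List String :=
  (pvGoA system_pkg_info (PySem.Set.empty, []) pkglist).1

-- ===== PORT B =====
-- Source B's `frames` is a Python list of iterators with the active one at the END; here the active
-- frame is the HEAD and an iterator is the list of its not-yet-yielded elements, so
-- `next(frames[-1], None)` is a pattern match on the head frame, an exhausted iterator is `[]`
-- (frames.pop() drops it), and frames.append(iter(children)) conses the children in front.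
-- The two accumulators stay two separate arguments, as in Source B.
def pvFramesB (info : List (String × List (List String)))
    (res : PySem.Set String) (inv : List String) (frames : List (List String)) :
    List String × List String :=
  match frames with
  | [] => (res, inv)
  | [] :: fs => pvFramesB info res inv fs
  | (p :: rest) :: fs =>
    if hmem : PySem.Set.contains res p = true then
      pvFramesB info res inv (rest :: fs)
    else
      match hlk : (PySem.Dict.mk info).get? p with
      | some v => pvFramesB info (PySem.Set.add res p) inv (((PySem.List.pyGet? v 2).getD []) :: rest :: fs)
      | none => pvFramesB info res (inv ++ [p]) (rest :: fs)
termination_by (pvUnvisited info res, (frames.map List.length).sum + frames.length)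
decreasing_by
  · exact Prod.Lex.right _ (by simp)
  · exact Prod.Lex.right _ (by simp)
  · apply Prod.Lex.left
    have hp : p ∉ res := fun h => hmem ((PySem.Set.contains_iff _ _).mpr h)
    exact pvUnvisited_lt (fun x hx => by simp [PySem.Set.mem_add]; exact Or.inl hx)
      (by simp [PySem.Set.mem_add]) (pv_key_mem hlk) hp
  · exact Prod.Lex.right _ (by simp)

def get_pkglist_recursive_needs_alt (system_pkg_info : List (String × List (List String))) (pkglist : List String) : List String × List String :=
  pvFramesB system_pkg_info PySem.Set.empty [] [pkglist]

-- ===== PRECONDITION & SPEC =====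
-- Pre_ excludes tables containing an entry whose value list has fewer than 3 elements while its key occurs
-- in pkglist or in some entry's dependency list (its value at index 2): if such a key is reached, A raises
-- IndexError on system_pkg_info[pkg][2]
-- (the syntactic occurrence check over-approximates reachability, so a few inputs on which A returns are also excluded).
def Pre_get_pkglist_recursive_needs (system_pkg_info : List (String × List (List String))) (pkglist : List String) : Prop :=
  ∀ kv ∈ system_pkg_info, 3 ≤ kv.2.length ∨
    (kv.1 ∉ pkglist ∧ ∀ kv2 ∈ system_pkg_info, kv.1 ∉ (PySem.List.pyGet? kv2.2 2).getD [])
instance (system_pkg_info : List (String × List (List String))) (pkglist : List String) : Decidable (Pre_get_pkglist_recursive_needs system_pkg_info pkglist) := by unfold Pre_get_pkglist_recursive_needs; infer_instance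

def pvWitness_get_pkglist_recursive_needs : (List (String × List (List String))) × List String :=
  ([("a", [["x"], ["y"], ["b"]]), ("b", [[], [], []])], ["a", "c"])

def Spec_get_pkglist_recursive_needs (system_pkg_info : List (String × List (List String))) (pkglist : List String) (out : List String × List String) : Prop := out = get_pkglist_recursive_needs_alt system_pkg_info pkglist
instance (system_pkg_info : List (String × List (List String))) (pkglist : List String) (out : List String × List String) : Decidable (Spec_get_pkglist_recursive_needs system_pkg_info pkglist out) := by unfold Spec_get_pkglist_recursive_needs; infer_instance

-- ===== CLAIM (what is proved, stated in full; the proofs are below) =====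
def Claim_equal_get_pkglist_recursive_needs : Prop := ∀ (system_pkg_info : List (String × List (List String))) (pkglist : List String), Dom_get_pkglist_recursive_needs system_pkg_info pkglist → Pre_get_pkglist_recursive_needs system_pkg_info pkglist → Spec_get_pkglist_recursive_needs system_pkg_info pkglist (get_pkglist_recursive_needs system_pkg_info pkglist)

-- ===== LEMMAS AND PROOFS =====

-- the frames loop started with `l` as the top frame equals running A's recursive helper on l,
-- then the loop on the remaining frames
theorem pv_frames_go (info : List (String × List (List String)))
    (st : PySem.Set String × List String) (l : List String) :
    ∀ fs : List (List String),
      pvFramesB info st.1 st.2 (l :: fs) =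
        pvFramesB info (pvGoA info st l).1.1 (pvGoA info st l).1.2 fs := by
  induction st, l using pvGoA.induct info with
  | case1 st => intro fs; simp [pvGoA, pvFramesB]
  | case2 st p rest hmem ih =>
    intro fs
    have hm : p ∈ st.1 := (PySem.Set.contains_iff _ _).mp hmem
    simp [pvFramesB, pvGoA, hm, ih fs]
  | case3 st p rest hmem v hlk r1 ihc ihr =>
    intro fs
    rw [pvFramesB.eq_def]
    conv_rhs => rw [pvGoA.eq_def]
    simp only [dif_neg hmem]
    split
    · rename_i v' heq
      rw [hlk] at heq
      obtain rfl := Option.some.inj heq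
      rw [ihc (rest :: fs), ihr fs]
    · rename_i heq
      rw [hlk] at heq
      cases heq
  | case4 st p rest hmem hlk ih =>
    intro fs
    rw [pvFramesB.eq_def]
    conv_rhs => rw [pvGoA.eq_def]
    simp only [dif_neg hmem]
    split
    · rename_i v' heq
      rw [hlk] at heq
      cases heq
    · simpa using ih fs

-- ===== VERDICT (by name: the statement is the Claim_ definition above) =====
theorem get_pkglist_recursive_needs_spec : Claim_equal_get_pkglist_recursive_needs := by
  intro info pkglist _hdom _hpre
  unfold Spec_get_pkglist_recursive_needs get_pkglist_recursive_needs get_pkglist_recursive_needs_alt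
  have h := pv_frames_go info (PySem.Set.empty, []) pkglist []
  simpa [pvFramesB] using h.symm
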